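-- pv_equiv track=rewrite | github.com/Danil-Kutnyy/Neuroevolution | GenPile_2.py | exon_types
-- ===== SOURCE A (Python) =====
-- import math
--
-- def exon_types(number_of_types):
-- 	possibel_codons = ['ATA', 'ATC', 'ATG', 'GTA', 'GTC', 'GTG', 'TTA', 'TTC', 'TTG', 'CTA', 'CTC', 'CTG', 'CAA', 'CAC', 'CAG', 'CAT', 'CCA', 'CCC', 'CCG', 'CCT', 'CGA', 'CGC', 'CGG', 'CGT', 'AAA', 'AAC', 'AAG', 'AAT', 'ACA', 'ACC', 'ACG', 'ACT', 'AGA', 'AGC', 'AGG', 'AGT', 'GAA', 'GAC', 'GAG', 'GAT', 'GCA', 'GCC', 'GCG', 'GCT', 'GGA', 'GGC', 'GGG', 'GGT', 'TAA', 'TAC', 'TAG', 'TAT', 'TCA', 'TCC', 'TCG', 'TCT', 'TGA', 'TGC', 'TGG', 'TGT']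
-- 	codon_none = ['ATT', 'GTT', 'TTT', 'CTT']
-- 	exon_divide_by = math.floor( len(possibel_codons) / number_of_types )
-- 	additional = len(possibel_codons) - exon_divide_by *number_of_types
-- 	exons = []
-- 	for i in range( number_of_types ):
-- 		exons.append( set(possibel_codons[i*exon_divide_by:(i+1)*exon_divide_by]) )
-- 	if additional != 0:
-- 		exons[0] = exons[0].union(set(possibel_codons[-additional:]))
-- 	exons.append(set(codon_none))
-- 	return exons
-- ===== SOURCE B (Python) =====
-- def exon_types(number_of_types):
--     possibel_codons = ['ATA', 'ATC', 'ATG', 'GTA', 'GTC', 'GTG', 'TTA', 'TTC', 'TTG', 'CTA', 'CTC', 'CTG', 'CAA', 'CAC', 'CAG', 'CAT', 'CCA', 'CCC', 'CCG', 'CCT', 'CGA', 'CGC', 'CGG', 'CGT', 'AAA', 'AAC', 'AAG', 'AAT', 'ACA', 'ACC', 'ACG', 'ACT', 'AGA', 'AGC', 'AGG', 'AGT', 'GAA', 'GAC', 'GAG', 'GAT', 'GCA', 'GCC', 'GCG', 'GCT', 'GGA', 'GGC', 'GGG', 'GGT', 'TAA', 'TAC', 'TAG', 'TAT', 'TCA',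 'TCC', 'TCG', 'TCT', 'TGA', 'TGC', 'TGG', 'TGT']
--     codon_none = ['ATT', 'GTT', 'TTT', 'CTT']
--     exon_divide_by = len(possibel_codons) // number_of_types
--     groups = [set() for _ in range(number_of_types)]
--     for i, codon in enumerate(possibel_codons):
--         g = i // exon_divide_by if exon_divide_by > 0 else 0
--         if g >= number_of_types:
--             g = 0
--         groups[g].add(codon)
--     groups.append(set(codon_none))
--     return groups
-- ===== Notes on version B (the rewrite author's own statement) =====
-- stated objective: alternative
-- what changed: Replaces A's per-group slicing loop plus a post-hoc union of the leftover tail into group 0 by preallocating the group sets and making a single enumerate pass over the 60 codons, computing each codon's group index arithmetically (i // exon_divide_by, leftovers redirected to group 0).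
-- outside the precondition, e.g. on exon_types(-1): A returns [{'ATT', 'TTT', 'CTT', 'GTT'}], B raises IndexError
import Mathlib
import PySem

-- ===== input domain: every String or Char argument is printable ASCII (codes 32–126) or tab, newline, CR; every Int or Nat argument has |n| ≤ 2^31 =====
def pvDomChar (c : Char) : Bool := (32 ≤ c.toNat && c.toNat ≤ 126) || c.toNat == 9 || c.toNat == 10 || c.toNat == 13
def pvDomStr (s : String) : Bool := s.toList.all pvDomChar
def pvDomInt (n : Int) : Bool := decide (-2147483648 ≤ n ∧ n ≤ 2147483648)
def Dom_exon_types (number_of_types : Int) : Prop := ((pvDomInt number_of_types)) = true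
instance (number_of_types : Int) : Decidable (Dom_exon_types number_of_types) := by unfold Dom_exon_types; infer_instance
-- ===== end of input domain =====

-- B partitions the 60 codons in one enumerate pass with an arithmetic group index
-- instead of A's per-group slicing plus a union of the leftover tail into group 0 (objective: alternative).


def pvCodons : List String := ["ATA", "ATC", "ATG", "GTA", "GTC", "GTG", "TTA", "TTC", "TTG", "CTA", "CTC", "CTG", "CAA", "CAC", "CAG", "CAT", "CCA", "CCC", "CCG", "CCT", "CGA", "CGC", "CGG", "CGT", "AAA", "AAC", "AAG", "AAT", "ACA", "ACC", "ACG", "ACT", "AGA", "AGC", "AGG", "AGT", "GAA", "GAC", "GAG", "GAT", "GCA", "GCC", "GCG", "GCT", "GGA", "GGC", "GGG", "GGT", "TAA", "TAC", "TAG", "TAT", "TCA", "TCC", "TCG", "TCT", "TGA", "TGC", "TGG", "TGT"]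

def pvCodonNone : List String := ["ATT", "GTT", "TTT", "CTT"]

-- ===== PORT A =====
def exon_types (number_of_types : Int) : List (List String) :=
  let exon_divide_by := PySem.Int.floordiv 60 number_of_types
  let additional := 60 - exon_divide_by * number_of_types
  let exons := (PySem.List.pyRange 0 number_of_types 1).foldl
    (fun acc i => acc ++ [PySem.Set.ofList
      (PySem.List.slice pvCodons (some (i * exon_divide_by)) (some ((i + 1) * exon_divide_by)))]) []
  let exons := if additional ≠ 0 then
      match exons with
      | [] => []   -- Python raises IndexError here (exons[0] on an empty list); excluded by Pre_
      | e0 :: rest =>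
          PySem.Set.union e0 (PySem.Set.ofList (PySem.List.slice pvCodons (some (-additional)) none)) :: rest
    else exons
  exons ++ [PySem.Set.ofList pvCodonNone]

-- ===== PORT B =====
def exon_types_alt (number_of_types : Int) : List (List String) :=
  let exon_divide_by := PySem.Int.floordiv 60 number_of_types
  let groups := (PySem.List.pyRange 0 number_of_types 1).foldl
    (fun acc _ => acc ++ [(PySem.Set.empty : PySem.Set String)]) []
  let groups := (PySem.List.enumerate pvCodons 0).foldl
    (fun acc p =>
      let g0 := if exon_divide_by > 0 then PySem.Int.floordiv p.1 exon_divide_by else 0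
      let g := if g0 ≥ number_of_types then 0 else g0
      acc.modify g.toNat (fun s => PySem.Set.add s p.2)) groups
  groups ++ [PySem.Set.ofList pvCodonNone]

-- ===== PRECONDITION & SPEC =====
-- Pre_ excludes number_of_types ≤ 0: there A raises ZeroDivisionError (at 0) or IndexError (most
-- negatives), except on negative divisors of 60, where A returns the degenerate [stop-set only]
-- value (all 60 codons silently dropped) and B's single pass raises IndexError.
def Pre_exon_types (number_of_types : Int) : Prop := 1 ≤ number_of_types
instance (number_of_types : Int) : Decidable (Pre_exon_types number_of_types) := by unfold Pre_exon_types; infer_instance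
def pvWitness_exon_types : Int := (3)

def Spec_exon_types (number_of_types : Int) (out : List (List String)) : Prop := out = exon_types_alt number_of_types
instance (number_of_types : Int) (out : List (List String)) : Decidable (Spec_exon_types number_of_types out) := by unfold Spec_exon_types; infer_instance

-- ===== CLAIM (what is proved, stated in full; the proofs are below) =====
def Claim_equal_exon_types : Prop := ∀ (number_of_types : Int), Dom_exon_types number_of_types → Pre_exon_types number_of_types → Spec_exon_types number_of_types (exon_types number_of_types)

-- ===== LEMMAS AND PROOFS =====

-- folding 'modify index 0' over a list only rewrites the head
lemma pv_foldl_modify_zero {α β : Type} (l : List α) (f : α → β → β) (x : β) (t : List β) :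
    l.foldl (fun acc p => acc.modify 0 (f p)) (x :: t) = (l.foldl (fun b p => f p b) x) :: t := by
  induction l generalizing x with
  | nil => rfl
  | cons y ys ih => simpa [List.foldl, List.modify] using ih (f y x)

-- for number_of_types ≥ 61 exon_divide_by is 0: A's n slices are all empty and the whole codon
-- list is unioned into group 0; B sends every codon to group 0 as well
set_option maxRecDepth 40000 in
lemma pv_exon_types_big (n : Int) (h61 : 61 ≤ n) : exon_types n = exon_types_alt n := by
  have hn0 : (0:Int) < n := by omega
  have hed : PySem.Int.floordiv 60 n = 0 := by
    rw [PySem.Int.floordiv_eq_iff_of_pos hn0]; constructor <;> [simp; omega]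
  simp only [exon_types, exon_types_alt, hed]
  have hnge : ¬ ((0:Int) ≥ n) := by omega
  norm_num [hnge, PySem.List.slice_to]
  obtain ⟨k, hk⟩ : ∃ k, n.toNat = k + 1 := ⟨n.toNat - 1, by omega⟩
  rw [hk, List.replicate_succ, pv_foldl_modify_zero]
  congr 1

-- ===== VERDICT (by name: the statement is the Claim_ definition above) =====
set_option maxRecDepth 40000 in
set_option maxHeartbeats 4000000 in
theorem exon_types_spec : Claim_equal_exon_types := by
  intro n _ hpre
  unfold Pre_exon_types at hpre
  unfold Spec_exon_types
  by_cases hle : n ≤ 60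
  · interval_cases n <;> decide
  · exact pv_exon_types_big n (by omega)
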